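-- pv_equiv track=rewrite | github.com/tonyredondo/agent-skills | podcast-maker/scripts/pipeline/schema.py | _sentence_count
-- ===== SOURCE A (Python) =====
-- def _sentence_count(text: str) -> int:
--     """Count coarse sentence boundaries using simple punctuation checks."""
--     count = 0
--     in_sentence = False
--     for ch in str(text or ""):
--         if ch.strip():
--             in_sentence = True
--         if ch in ".!?" and in_sentence:
--             count += 1
--             in_sentence = False
--     if in_sentence:
--         count += 1
--     return count
-- ===== SOURCE B (Python) =====
-- def _sentence_count(text: str) -> int:
--     """Count coarse sentence boundaries: every terminal punctuation char,
--     plus one for a trailing unterminated fragment."""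
--     s = str(text or "")
--     count = sum(1 for ch in s if ch in ".!?")
--     stripped = s.rstrip()
--     if stripped and stripped[-1] not in ".!?":
--         count += 1
--     return count
-- ===== Notes on version B (the rewrite author's own statement) =====
-- stated objective: simpler
-- what changed: Replaced A's stateful in_sentence finite-state loop with a stateless decomposition: count every terminal punctuation character (a single comprehension), then add one iff the rstrip-ed text ends in a non-terminal character.
import Mathlib
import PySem

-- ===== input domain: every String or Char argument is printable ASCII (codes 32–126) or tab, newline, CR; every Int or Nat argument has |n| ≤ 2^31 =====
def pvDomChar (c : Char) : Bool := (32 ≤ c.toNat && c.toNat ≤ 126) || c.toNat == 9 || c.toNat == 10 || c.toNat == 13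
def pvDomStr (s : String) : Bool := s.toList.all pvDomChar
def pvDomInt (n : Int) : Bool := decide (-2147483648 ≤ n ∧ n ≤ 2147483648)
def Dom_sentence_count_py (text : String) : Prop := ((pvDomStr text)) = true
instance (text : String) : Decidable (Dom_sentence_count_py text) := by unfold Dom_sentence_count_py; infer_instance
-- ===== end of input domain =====

-- B replaces A's stateful in_sentence loop with a stateless decomposition
-- (count terminal chars + one rstrip tail check); objective: simpler.


-- ===== PORT A =====
-- one step of A's for-loop over the characters; state = (count, in_sentence)
def sentenceStep (st : Int × Bool) (ch : Char) : Int × Bool :=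
  -- `if ch.strip():` — a one-char string strips to nonempty iff the char is not whitespace
  let ins := if PySem.Chars.strip [ch] ≠ [] then true else st.2
  -- `if ch in ".!?" and in_sentence:`
  if ch ∈ (['.', '!', '?'] : List Char) ∧ ins = true then (st.1 + 1, false)
  else (st.1, ins)

-- str(text or "") = text for a str argument (both branches give the same string)
def sentence_count_py (text : String) : Int :=
  let r := text.toList.foldl sentenceStep (0, false)
  if r.2 then r.1 + 1 else r.1

-- ===== PORT B =====
def sentence_count_py_alt (text : String) : Int :=
  let s := text.toList                     -- str(text or "")
  let count : Int := (s.countP (fun ch => decide (ch ∈ (['.', '!', '?'] : List Char))) : Int)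
  let stripped := PySem.Chars.rstrip s     -- s.rstrip()
  match stripped.getLast? with             -- `stripped and stripped[-1] not in ".!?"`
  | none => count
  | some c => if c ∈ (['.', '!', '?'] : List Char) then count else count + 1

-- ===== PRECONDITION & SPEC =====
def Spec_sentence_count_py (text : String) (out : Int) : Prop := out = sentence_count_py_alt text
instance (text : String) (out : Int) : Decidable (Spec_sentence_count_py text out) := by unfold Spec_sentence_count_py; infer_instance

-- ===== CLAIM (what is proved, stated in full; the proofs are below) =====
def Claim_equal_sentence_count_py : Prop := ∀ (text : String), Dom_sentence_count_py text → Spec_sentence_count_py text (sentence_count_py text)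

-- ===== LEMMAS AND PROOFS =====
def pvTerm (c : Char) : Bool := decide (c ∈ (['.', '!', '?'] : List Char))

-- the in_sentence flag after processing l, starting from flag b
def pvFlag (b : Bool) (l : List Char) : Bool :=
  match l.reverse.dropWhile PySem.Chars.isspace with
  | [] => b
  | c :: _ => !pvTerm c

lemma strip_single (c : Char) :
    (PySem.Chars.strip [c] ≠ []) ↔ PySem.Chars.isspace c = false := by
  by_cases h : PySem.Chars.isspace c = true
  · simp [PySem.Chars.strip, PySem.Chars.lstrip, PySem.Chars.rstrip, List.dropWhile, h]
  · simp only [Bool.not_eq_true] at h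
    simp [PySem.Chars.strip, PySem.Chars.lstrip, PySem.Chars.rstrip, List.dropWhile, h]

lemma term_not_space (c : Char) (h : pvTerm c = true) : PySem.Chars.isspace c = false := by
  simp [pvTerm] at h
  rcases h with h | h | h <;> subst h <;> decide

lemma fold_inv (l : List Char) (init : Int × Bool) :
    l.foldl sentenceStep init = (init.1 + (l.countP pvTerm : Int), pvFlag init.2 l) := by
  induction l using List.reverseRecOn with
  | nil => simp [pvFlag]
  | append_singleton l c ih =>
      rw [List.foldl_append, ih]
      by_cases hs : PySem.Chars.isspace c = true
      · have ht : pvTerm c = false := by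
          by_contra h
          simp only [Bool.not_eq_false] at h
          exact absurd (term_not_space c h) (by simp [hs])
        have hmem : ¬ c ∈ (['.', '!', '?'] : List Char) := by
          simpa [pvTerm] using ht
        simp [sentenceStep, pvFlag, strip_single, hs, hmem, List.countP_append, ht]
      · simp only [Bool.not_eq_true] at hs
        by_cases ht : pvTerm c = true
        · have hmem : c ∈ (['.', '!', '?'] : List Char) := by simpa [pvTerm] using ht
          simp [sentenceStep, pvFlag, strip_single, hs, hmem, List.countP_append, ht]
          ring
        · simp only [Bool.not_eq_true] at ht
          have hmem : ¬ c ∈ (['.', '!', '?'] : List Char) := by simpa [pvTerm] using ht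
          simp [sentenceStep, pvFlag, strip_single, hs, hmem, List.countP_append, ht]

-- ===== VERDICT (by name: the statement is the Claim_ definition above) =====
theorem sentence_count_py_spec : Claim_equal_sentence_count_py := by
  intro text _
  unfold Spec_sentence_count_py sentence_count_py sentence_count_py_alt
  rw [fold_inv]
  have hlast : (PySem.Chars.rstrip text.toList).getLast? =
      (text.toList.reverse.dropWhile PySem.Chars.isspace).head? := by
    simp [PySem.Chars.rstrip, List.getLast?_reverse]
  dsimp only
  rw [hlast]
  cases hd : text.toList.reverse.dropWhile PySem.Chars.isspace with
  | nil =>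
      simp [pvFlag, hd]
      exact List.countP_congr (fun x _ => by simp [pvTerm])
  | cons c rest =>
      by_cases ht : pvTerm c = true
      · have hmem : c ∈ (['.', '!', '?'] : List Char) := by simpa [pvTerm] using ht
        simp [pvFlag, hd, ht, hmem]
        exact List.countP_congr (fun x _ => by simp [pvTerm])
      · simp only [Bool.not_eq_true] at ht
        have hmem : ¬ c ∈ (['.', '!', '?'] : List Char) := by simpa [pvTerm] using ht
        simp [pvFlag, hd, ht, hmem]
        exact List.countP_congr (fun x _ => by simp [pvTerm])
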